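-- pv_equiv track=rewrite | github.com/dream-star-end/codeWiki | backend/app/services/learning_path.py | _calculate_file_complexity
-- ===== SOURCE A (Python) =====
-- from typing import List, Dict, Any, Optional
--
-- def _calculate_file_complexity(symbols: List[Dict]) -> int:
--     """计算文件复杂度分数"""
--     score = 0
--     for sym in symbols:
--         kind = sym.get("kind", "")
--         if kind == "class":
--             score += 10
--         elif kind == "function":
--             score += 3
--         elif kind == "method":
--             score += 2
--     return score
-- ===== SOURCE B (Python) =====
-- from typing import List, Dict, Any, Optional
--
-- def _calculate_file_complexity(symbols: List[Dict]) -> int: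
--     """计算文件复杂度分数"""
--     kinds = [sym.get("kind", "") for sym in symbols]
--     counts = {}
--     for k in kinds:
--         counts[k] = counts.get(k, 0) + 1
--     return (10 * counts.get("class", 0)
--             + 3 * counts.get("function", 0)
--             + 2 * counts.get("method", 0))
-- ===== Notes on version B (the rewrite author's own statement) =====
-- stated objective: alternative
-- what changed: B replaces the per-element weighted branch accumulation with a tally-then-combine decomposition: one pass builds a kind-frequency table, and the score is a single closed arithmetic combination 10*c[class]+3*c[function]+2*c[method] over that table.
import Mathlib
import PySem

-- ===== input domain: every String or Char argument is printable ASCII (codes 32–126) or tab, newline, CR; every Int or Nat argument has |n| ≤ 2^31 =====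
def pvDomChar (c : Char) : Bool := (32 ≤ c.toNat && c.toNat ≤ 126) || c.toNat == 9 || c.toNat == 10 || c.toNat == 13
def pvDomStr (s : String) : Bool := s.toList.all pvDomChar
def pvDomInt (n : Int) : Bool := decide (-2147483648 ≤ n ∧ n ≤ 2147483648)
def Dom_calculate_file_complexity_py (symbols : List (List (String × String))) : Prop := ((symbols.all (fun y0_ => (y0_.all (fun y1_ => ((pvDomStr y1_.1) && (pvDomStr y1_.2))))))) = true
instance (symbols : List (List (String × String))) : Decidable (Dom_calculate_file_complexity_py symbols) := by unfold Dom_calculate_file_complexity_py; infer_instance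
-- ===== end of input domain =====

-- B replaces A's per-element weighted branching by a tally-then-combine decomposition (same cost).

-- shared helper: sym.get("kind", "") on an association-list dict
def pvKindOf (sym : List (String × String)) : String :=
  (PySem.Dict.ofList sym).getD "kind" ""

-- ===== PORT A =====
def calculate_file_complexity_py (symbols : List (List (String × String))) : Int :=
  symbols.foldl (fun score sym =>
    let kind := pvKindOf sym
    if kind == "class" then score + 10
    else if kind == "function" then score + 3
    else if kind == "method" then score + 2
    else score) 0

-- ===== PORT B =====
def calculate_file_complexity_py_alt (symbols : List (List (String × String))) : Int :=
  let kinds := symbols.map pvKindOf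
  let counts : PySem.Dict String Int :=
    kinds.foldl (fun d k => d.insert k (d.getD k 0 + 1)) PySem.Dict.empty
  10 * counts.getD "class" 0 + 3 * counts.getD "function" 0 + 2 * counts.getD "method" 0

-- ===== PRECONDITION & SPEC =====
def Spec_calculate_file_complexity_py (symbols : List (List (String × String))) (out : Int) : Prop := out = calculate_file_complexity_py_alt symbols
instance (symbols : List (List (String × String))) (out : Int) : Decidable (Spec_calculate_file_complexity_py symbols out) := by unfold Spec_calculate_file_complexity_py; infer_instance

-- ===== CLAIM (what is proved, stated in full; the proofs are below) =====
def Claim_equal_calculate_file_complexity_py : Prop := ∀ (symbols : List (List (String × String))), Dom_calculate_file_complexity_py symbols → Spec_calculate_file_complexity_py symbols (calculate_file_complexity_py symbols)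

-- ===== LEMMAS AND PROOFS =====

-- A's accumulation equals 10/3/2 times the counts of the three kinds among the mapped kind list.
theorem pv_foldA_counts (symbols : List (List (String × String))) (s : Int) :
    symbols.foldl (fun score sym =>
      let kind := pvKindOf sym
      if kind == "class" then score + 10
      else if kind == "function" then score + 3
      else if kind == "method" then score + 2
      else score) s
    = s + 10 * ((symbols.map pvKindOf).count "class" : Int)
        + 3 * ((symbols.map pvKindOf).count "function" : Int)
        + 2 * ((symbols.map pvKindOf).count "method" : Int) := by
  induction symbols generalizing s with
  | nil => simp
  | cons hd tl ih =>
    simp only [List.foldl_cons, List.map_cons, List.count_cons, ih]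
    by_cases h1 : pvKindOf hd = "class"
    · simp [h1]; ring
    · by_cases h2 : pvKindOf hd = "function"
      · simp [h2]; ring
      · by_cases h3 : pvKindOf hd = "method"
        · simp [h3]; ring
        · simp [h1, h2, h3]

-- ===== VERDICT (by name: the statement is the Claim_ definition above) =====
theorem calculate_file_complexity_py_spec : Claim_equal_calculate_file_complexity_py := by
  intro symbols _
  unfold Spec_calculate_file_complexity_py calculate_file_complexity_py calculate_file_complexity_py_alt
  rw [pv_foldA_counts]
  simp [PySem.Dict.getD_foldl_insert_add_one]
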